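-- pv_equiv track=rewrite | github.com/AmirbekBakdaulet/pp2 | TSIS 3/function1/007.py | agent
-- ===== SOURCE A (Python) =====
-- def agent(thelist):
--     zero=False
--     seczero=False
--     for i in thelist:
--         if i==0 and zero==True:
--             seczero=True
--         elif i==0 and zero==False:
--             zero=True
--         elif i==7:
--             if seczero==True:
--                 return True
--             else:
--                 zero==False
--     return False
-- ===== SOURCE B (Python) =====
-- def agent(thelist):
--     if 0 not in thelist:
--         return False
--     rest = thelist[thelist.index(0) + 1:]
--     if 0 not in rest:
--         return False
--     rest = rest[rest.index(0) + 1:]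
--     return 7 in rest
-- ===== Notes on version B (the rewrite author's own statement) =====
-- stated objective: simpler
-- what changed: Replaced A's one-pass boolean state machine (zero/seczero flags with a dead 'zero==False' statement) by two index/slice phases: cut the list after the first zero, cut again after the next zero, then test membership of 7 in the remainder.
import Mathlib
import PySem

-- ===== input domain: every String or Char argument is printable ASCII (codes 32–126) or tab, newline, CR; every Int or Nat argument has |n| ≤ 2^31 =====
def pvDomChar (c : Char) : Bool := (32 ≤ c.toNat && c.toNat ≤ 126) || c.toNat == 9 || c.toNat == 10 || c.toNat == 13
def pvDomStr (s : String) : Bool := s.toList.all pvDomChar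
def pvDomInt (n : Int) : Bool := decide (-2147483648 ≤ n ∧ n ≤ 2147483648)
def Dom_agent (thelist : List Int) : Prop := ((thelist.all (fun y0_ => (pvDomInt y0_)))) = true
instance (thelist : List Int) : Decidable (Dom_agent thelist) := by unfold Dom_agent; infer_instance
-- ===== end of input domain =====

-- B: instead of A's one-pass boolean state machine, cut the list after the first zero,
-- then after the next zero, then test membership of 7 — simpler decomposition, same O(n).

-- ===== PORT A =====
-- literal port of A's loop with state (zero, seczero); the 'zero==False' line is a no-op
def agentLoop : List Int → Bool → Bool → Bool
  | [], _, _ => false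
  | i :: rest, zero, seczero =>
    if i == 0 && zero == true then agentLoop rest zero true
    else if i == 0 && zero == false then agentLoop rest true seczero
    else if i == 7 then
      (if seczero == true then true else agentLoop rest zero seczero)
    else agentLoop rest zero seczero

def agent (thelist : List Int) : Bool := agentLoop thelist false false

-- ===== PORT B =====
-- rest = rest[rest.index(0)+1:]  (only called when 0 ∈ rest)
def cutAfterZero (rest : List Int) : List Int :=
  PySem.List.slice rest (some ((PySem.List.index? rest 0).getD 0 + 1 : Int)) none

def agent_alt (thelist : List Int) : Bool :=
  if !thelist.contains 0 then false
  else
    let rest := cutAfterZero thelist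
    if !rest.contains 0 then false
    else
      let rest2 := cutAfterZero rest
      rest2.contains 7

-- ===== PRECONDITION & SPEC =====
def Spec_agent (thelist : List Int) (out : Bool) : Prop := out = agent_alt thelist
instance (thelist : List Int) (out : Bool) : Decidable (Spec_agent thelist out) := by unfold Spec_agent; infer_instance

-- ===== CLAIM (what is proved, stated in full; the proofs are below) =====
def Claim_equal_agent : Prop := ∀ (thelist : List Int), Dom_agent thelist → Spec_agent thelist (agent thelist)

-- ===== LEMMAS AND PROOFS =====

-- once seczero is set, A just searches for a 7
theorem agentLoop_seczero (l : List Int) : ∀ z, agentLoop l z true = l.contains 7 := by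
  induction l with
  | nil => intro z; simp [agentLoop]
  | cons x rest ih =>
    intro z
    by_cases hx0 : x = 0
    · subst hx0; cases z <;> simp [agentLoop, ih]
    · by_cases hx7 : x = 7
      · subst hx7; simp [agentLoop]
      · have hx7' : (7 : Int) ≠ x := fun h => hx7 h.symm
        simp [agentLoop, hx0, hx7, hx7', ih]

-- cutAfterZero drops everything up to and including the first zero
theorem cutAfterZero_cons_zero (rest : List Int) : cutAfterZero (0 :: rest) = rest := by
  unfold cutAfterZero
  rw [PySem.List.index?_cons_self]
  simp only [Option.getD_some]
  have h1 : (((0 : Nat) : Int) + 1) = ((1 : Nat) : Int) := by norm_num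
  rw [h1, PySem.List.slice_from_natCast]
  rfl

theorem cutAfterZero_cons_ne (x : Int) (rest : List Int) (hx : x ≠ 0) (h0 : rest.contains 0) :
    cutAfterZero (x :: rest) = cutAfterZero rest := by
  have hmem : (0 : Int) ∈ rest := by simpa using h0
  obtain ⟨k, hk⟩ : ∃ k, PySem.List.index? rest 0 = some k := by
    cases h : PySem.List.index? rest 0 with
    | none => exact absurd ((PySem.List.index?_eq_none_iff rest 0).mp h) (by simpa)
    | some k => exact ⟨k, rfl⟩
  unfold cutAfterZero
  rw [PySem.List.index?_cons_of_ne rest hx, hk]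
  simp only [Option.map_some, Option.getD_some]
  have h1 : (((k + 1 : Nat)) : Int) + 1 = (((k + 2 : Nat)) : Int) := by push_cast; ring
  have h2 : ((k : Int) + 1) = (((k + 1 : Nat)) : Int) := by push_cast; ring
  rw [h1, h2, PySem.List.slice_from_natCast, PySem.List.slice_from_natCast]
  show (x :: rest).drop (k + 1 + 1) = rest.drop (k + 1)
  rw [List.drop_succ_cons]

-- after one zero has been seen, A's loop equals: cut at next zero, then search 7
theorem agentLoop_one (l : List Int) :
    agentLoop l true false =
      (if !l.contains 0 then false else (cutAfterZero l).contains 7) := by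
  induction l with
  | nil => simp [agentLoop]
  | cons x rest ih =>
    by_cases hx0 : x = 0
    · subst hx0
      simp [agentLoop, agentLoop_seczero, cutAfterZero_cons_zero]
    · have hx0' : (0 : Int) ≠ x := fun h => hx0 h.symm
      by_cases h0 : rest.contains 0
      · rw [cutAfterZero_cons_ne x rest hx0 h0]
        have h0' : (0 : Int) ∈ rest := by simpa using h0
        by_cases hx7 : x = 7
        · subst hx7; simp [agentLoop, ih, h0', hx0']
        · have hx7' : (7 : Int) ≠ x := fun h => hx7 h.symm
          simp [agentLoop, hx0, hx7, ih, h0', hx0']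
      · have h0' : (0 : Int) ∉ rest := by simpa using h0
        by_cases hx7 : x = 7
        · subst hx7; simp [agentLoop, ih, h0', hx0']
        · have hx7' : (7 : Int) ≠ x := fun h => hx7 h.symm
          simp [agentLoop, hx0, hx7, ih, h0', hx0']

-- before any zero, A's loop equals: cut at first zero, then continue in state (true,false)
theorem agentLoop_zero (l : List Int) :
    agentLoop l false false =
      (if !l.contains 0 then false else agentLoop (cutAfterZero l) true false) := by
  induction l with
  | nil => simp [agentLoop]
  | cons x rest ih =>
    by_cases hx0 : x = 0
    · subst hx0
      simp [agentLoop, cutAfterZero_cons_zero]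
    · have hx0' : (0 : Int) ≠ x := fun h => hx0 h.symm
      by_cases h0 : rest.contains 0
      · rw [cutAfterZero_cons_ne x rest hx0 h0]
        have h0' : (0 : Int) ∈ rest := by simpa using h0
        by_cases hx7 : x = 7
        · subst hx7; simp [agentLoop, ih, h0', hx0']
        · have hx7' : (7 : Int) ≠ x := fun h => hx7 h.symm
          simp [agentLoop, hx0, hx7, ih, h0', hx0']
      · have h0' : (0 : Int) ∉ rest := by simpa using h0
        by_cases hx7 : x = 7
        · subst hx7; simp [agentLoop, ih, h0', hx0']
        · have hx7' : (7 : Int) ≠ x := fun h => hx7 h.symm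
          simp [agentLoop, hx0, hx7, ih, h0', hx0']

-- ===== VERDICT (by name: the statement is the Claim_ definition above) =====
theorem agent_spec : Claim_equal_agent := by
  intro thelist _
  unfold Spec_agent agent agent_alt
  rw [agentLoop_zero]
  by_cases h0 : thelist.contains 0
  · have h0' : (0 : Int) ∈ thelist := by simpa using h0
    simp [h0', agentLoop_one]
  · have h0' : (0 : Int) ∉ thelist := by simpa using h0
    simp [h0']
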